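-- pv_equiv track=rewrite | github.com/tomaslibson/Algo-1-python | yago.py | torneo_de_gallinas
-- ===== SOURCE A (Python) =====
-- def torneo_de_gallinas(estrategias: dict[(str,str)]) -> dict[(str, int)]:
--     desvio = "me desvio siempre"
--     banco = "me la banco y no me desvio"
--
--     puntajes = {}
--     keys = list(estrategias.keys())
--     listado = list(estrategias.items())
--
--     for k in keys:
--         puntajes[k] = 0
--
--     for (jugador, play) in listado:
--             for (jugador2, play2) in listado:
--                 if jugador != jugador2:
--                     if play == desvio and play2 == desvio:
--                         puntajes[jugador]-= 10
--                     elif play == desvio and play2 == banco: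
--                          puntajes[jugador]-= 15
--                     elif play == banco and play2 == desvio:
--                          puntajes[jugador]+= 10
--                     elif play == banco and play2 == banco:
--                          puntajes[jugador]-= 5
--     return puntajes
-- ===== SOURCE B (Python) =====
-- def torneo_de_gallinas(estrategias: dict[(str, str)]) -> dict[(str, int)]:
--     desvio = "me desvio siempre"
--     banco = "me la banco y no me desvio"
--     nd = sum(1 for p in estrategias.values() if p == desvio)
--     nb = sum(1 for p in estrategias.values() if p == banco)
--     puntajes = {}
--     for jugador, play in estrategias.items():
--         if play == desvio:
--             puntajes[jugador] = -10 * (nd - 1) - 15 * nb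
--         elif play == banco:
--             puntajes[jugador] = 10 * nd - 5 * (nb - 1)
--         else:
--             puntajes[jugador] = 0
--     return puntajes
-- ===== Notes on version B (the rewrite author's own statement) =====
-- stated objective: faster
-- what changed: B replaces A's quadratic all-pairs scan with one pass that counts the two strategy totals globally and computes each player's score by a closed formula from the counts.
import Mathlib
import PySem

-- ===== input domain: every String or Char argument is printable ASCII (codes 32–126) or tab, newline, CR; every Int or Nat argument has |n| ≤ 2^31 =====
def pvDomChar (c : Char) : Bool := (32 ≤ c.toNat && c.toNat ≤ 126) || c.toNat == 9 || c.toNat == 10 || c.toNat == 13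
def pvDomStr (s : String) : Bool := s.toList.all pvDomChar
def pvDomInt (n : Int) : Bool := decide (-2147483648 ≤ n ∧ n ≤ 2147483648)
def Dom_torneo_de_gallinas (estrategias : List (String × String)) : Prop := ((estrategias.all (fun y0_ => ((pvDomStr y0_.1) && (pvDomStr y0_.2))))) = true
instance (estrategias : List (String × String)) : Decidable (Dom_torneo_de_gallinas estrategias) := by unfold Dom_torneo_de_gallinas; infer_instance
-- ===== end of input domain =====

-- B replaces A's quadratic all-pairs scan by global strategy counts and an O(1) closed form per player (objective: faster).

-- ===== PORT A =====
-- the body of A's inner loop, one opponent (jugador2, play2) against the outer (jugador, play)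
def tdgStepA (jp : String × String) (d : PySem.Dict String Int) (jp2 : String × String) : PySem.Dict String Int :=
  if jp.1 ≠ jp2.1 then
    if jp.2 = "me desvio siempre" ∧ jp2.2 = "me desvio siempre" then d.modify jp.1 0 (· - 10)
    else if jp.2 = "me desvio siempre" ∧ jp2.2 = "me la banco y no me desvio" then d.modify jp.1 0 (· - 15)
    else if jp.2 = "me la banco y no me desvio" ∧ jp2.2 = "me desvio siempre" then d.modify jp.1 0 (· + 10)
    else if jp.2 = "me la banco y no me desvio" ∧ jp2.2 = "me la banco y no me desvio" then d.modify jp.1 0 (· - 5)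
    else d
  else d

def torneo_de_gallinas (estrategias : List (String × String)) : List (String × Int) :=
  let keys := estrategias.map Prod.fst
  let listado := estrategias
  let puntajes : PySem.Dict String Int := keys.foldl (fun d k => d.insert k 0) PySem.Dict.empty
  (listado.foldl (fun d jp => listado.foldl (tdgStepA jp) d) puntajes).items

-- ===== PORT B =====
-- closed-form score of one player from the two global counts
def tdgScoreB (nd nb : Int) (play : String) : Int :=
  if play = "me desvio siempre" then -10 * (nd - 1) - 15 * nb
  else if play = "me la banco y no me desvio" then 10 * nd - 5 * (nb - 1)
  else 0

def torneo_de_gallinas_alt (estrategias : List (String × String)) : List (String × Int) :=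
  let nd : Int := ((estrategias.map Prod.snd).filter (fun p => p = "me desvio siempre")).length
  let nb : Int := ((estrategias.map Prod.snd).filter (fun p => p = "me la banco y no me desvio")).length
  (estrategias.foldl (fun d (jp : String × String) => d.insert jp.1 (tdgScoreB nd nb jp.2)) PySem.Dict.empty).items

-- ===== PRECONDITION & SPEC =====
-- Pre_ only pins down the dict representation: a Python dict has unique keys, so association
-- lists with duplicate keys correspond to no input of A and are excluded.
def Pre_torneo_de_gallinas (estrategias : List (String × String)) : Prop :=
  (estrategias.map Prod.fst).Nodup
instance (estrategias : List (String × String)) : Decidable (Pre_torneo_de_gallinas estrategias) := by unfold Pre_torneo_de_gallinas; infer_instance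

def pvWitness_torneo_de_gallinas : (List (String × String)) :=
  [("ana", "me desvio siempre"), ("bob", "me la banco y no me desvio"), ("eva", "paso")]

def Spec_torneo_de_gallinas (estrategias : List (String × String)) (out : List (String × Int)) : Prop := out = torneo_de_gallinas_alt estrategias
instance (estrategias : List (String × String)) (out : List (String × Int)) : Decidable (Spec_torneo_de_gallinas estrategias out) := by unfold Spec_torneo_de_gallinas; infer_instance

-- ===== CLAIM (what is proved, stated in full; the proofs are below) =====
def Claim_equal_torneo_de_gallinas : Prop := ∀ (estrategias : List (String × String)), Dom_torneo_de_gallinas estrategias → Pre_torneo_de_gallinas estrategias → Spec_torneo_de_gallinas estrategias (torneo_de_gallinas estrategias)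

-- ===== LEMMAS AND PROOFS =====

-- the signed contribution of one opponent q to player jp, as A computes it
def tdgPay (jp q : String × String) : Int :=
  if jp.1 ≠ q.1 then
    if jp.2 = "me desvio siempre" ∧ q.2 = "me desvio siempre" then -10
    else if jp.2 = "me desvio siempre" ∧ q.2 = "me la banco y no me desvio" then -15
    else if jp.2 = "me la banco y no me desvio" ∧ q.2 = "me desvio siempre" then 10
    else if jp.2 = "me la banco y no me desvio" ∧ q.2 = "me la banco y no me desvio" then -5
    else 0
  else 0

theorem tdg_keys_stepA (jp : String × String) (d : PySem.Dict String Int)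
    (q : String × String) (h : d.contains jp.1 = true) :
    (tdgStepA jp d q).keys = d.keys := by
  unfold tdgStepA
  have hk : ∀ f : Int → Int, (d.modify jp.1 0 f).keys = d.keys := by
    intro f
    rw [PySem.Dict.keys_modify, PySem.Dict.keys_insert_of_contains _ _ h]
  split_ifs <;> simp [hk]

theorem tdg_getD_stepA (jp : String × String) (d : PySem.Dict String Int)
    (q : String × String) (x : String) :
    (tdgStepA jp d q).getD x 0 = d.getD x 0 + (if x = jp.1 then tdgPay jp q else 0) := by
  unfold tdgStepA tdgPay
  split_ifs with h1 h2 h3 h4 h5 <;>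
    (try simp only [PySem.Dict.getD_modify]) <;> (try split_ifs) <;> (try simp_all) <;> omega

theorem tdg_contains_stepA (jp : String × String) (d : PySem.Dict String Int)
    (q : String × String) (x : String) (h : d.contains jp.1 = true) (hx : d.contains x = true) :
    (tdgStepA jp d q).contains x = true := by
  rw [PySem.Dict.contains_iff_mem_keys] at hx ⊢
  rw [tdg_keys_stepA jp d q h]; exact hx

theorem tdg_inner (jp : String × String) (L : List (String × String))
    (d : PySem.Dict String Int) (h : d.contains jp.1 = true) :
    (L.foldl (tdgStepA jp) d).keys = d.keys ∧
    ∀ x, (L.foldl (tdgStepA jp) d).getD x 0 =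
      d.getD x 0 + (if x = jp.1 then (L.map (tdgPay jp)).sum else 0) := by
  induction L generalizing d with
  | nil => simp
  | cons q L ih =>
    have h' : (tdgStepA jp d q).contains jp.1 = true := tdg_contains_stepA jp d q jp.1 h h
    obtain ⟨hk, hg⟩ := ih (tdgStepA jp d q) h'
    refine ⟨by rw [List.foldl_cons, hk, tdg_keys_stepA jp d q h], ?_⟩
    intro x
    rw [List.foldl_cons, hg x, tdg_getD_stepA jp d q x]
    split_ifs <;> simp_all
    ring

theorem tdg_outer (LO : List (String × String)) (listado : List (String × String))
    (d : PySem.Dict String Int) (h : ∀ jp ∈ LO, d.contains jp.1 = true) :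
    (LO.foldl (fun d jp => listado.foldl (tdgStepA jp) d) d).keys = d.keys ∧
    ∀ x, (LO.foldl (fun d jp => listado.foldl (tdgStepA jp) d) d).getD x 0 =
      d.getD x 0 + ((LO.filter (fun jp => jp.1 = x)).map (fun jp => (listado.map (tdgPay jp)).sum)).sum := by
  induction LO generalizing d with
  | nil => simp
  | cons jp LO ih =>
    have hjp := h jp (by simp)
    obtain ⟨hk1, hg1⟩ := tdg_inner jp listado d hjp
    have h' : ∀ q ∈ LO, (listado.foldl (tdgStepA jp) d).contains q.1 = true := by
      intro q hq
      rw [PySem.Dict.contains_iff_mem_keys, hk1, ← PySem.Dict.contains_iff_mem_keys]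
      exact h q (by simp [hq])
    obtain ⟨hk, hg⟩ := ih _ h'
    refine ⟨by rw [List.foldl_cons, hk, hk1], ?_⟩
    intro x
    rw [List.foldl_cons, hg x, hg1 x, List.filter_cons]
    rcases eq_or_ne x jp.1 with hx | hx
    · simp only [hx, decide_true, if_true, List.map_cons, List.sum_cons]; ring
    · simp [if_neg hx, if_neg (Ne.symm hx)]

-- Σ of tdgPay (k,p) over the whole list, via the two counts
theorem tdg_pay_sum (k : String) (p : String) (L : List (String × String))
    (hnotin : ∀ q ∈ L, q.1 ≠ k) :
    (L.map (tdgPay (k, p))).sum =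
      (if p = "me desvio siempre" then
        -10 * (((L.map Prod.snd).filter (fun v => v = "me desvio siempre")).length : Int)
          - 15 * (((L.map Prod.snd).filter (fun v => v = "me la banco y no me desvio")).length : Int)
      else if p = "me la banco y no me desvio" then
        10 * (((L.map Prod.snd).filter (fun v => v = "me desvio siempre")).length : Int)
          - 5 * (((L.map Prod.snd).filter (fun v => v = "me la banco y no me desvio")).length : Int)
      else 0) := by
  induction L with
  | nil => simp
  | cons q L ih =>
    have hq : q.1 ≠ k := hnotin q (by simp)
    have ih' := ih (fun q hq => hnotin q (by simp [hq]))
    simp only [List.map_cons, List.sum_cons, List.filter_cons, ih']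
    unfold tdgPay
    have : ¬ (k, p).1 = q.1 := fun h => hq h.symm
    simp only [this, ne_eq, not_false_eq_true, if_true]
    split_ifs <;> simp_all <;> omega

theorem tdg_pay_split (k p : String) (pre suf : List (String × String))
    (hpre : ∀ q ∈ pre, q.1 ≠ k) (hsuf : ∀ q ∈ suf, q.1 ≠ k) :
    ((pre ++ (k, p) :: suf).map (tdgPay (k, p))).sum =
      tdgScoreB (((((pre ++ (k, p) :: suf).map Prod.snd).filter (fun v => v = "me desvio siempre")).length : Int))
                (((((pre ++ (k, p) :: suf).map Prod.snd).filter (fun v => v = "me la banco y no me desvio")).length : Int)) p := by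
  have hself : tdgPay (k, p) (k, p) = 0 := by unfold tdgPay; simp
  have h1 := tdg_pay_sum k p pre hpre
  have h2 := tdg_pay_sum k p suf hsuf
  simp only [List.map_append, List.sum_append, List.map_cons, List.sum_cons, hself,
    List.filter_append, List.length_append, List.filter_cons, tdgScoreB, h1, h2]
  split_ifs <;> simp_all <;> omega

-- the double-filter sum collapses to jp's own row, then to the closed form
theorem tdg_filter_sum (es : List (String × String)) (hnodup : (es.map Prod.fst).Nodup)
    (jp : String × String) (hmem : jp ∈ es) :
    ((es.filter (fun q => q.1 = jp.1)).map (fun q => (es.map (tdgPay q)).sum)).sum =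
      tdgScoreB (((es.map Prod.snd).filter (fun v => v = "me desvio siempre")).length : Int)
                (((es.map Prod.snd).filter (fun v => v = "me la banco y no me desvio")).length : Int) jp.2 := by
  obtain ⟨pre, suf, rfl⟩ := List.append_of_mem hmem
  have hnd := hnodup
  simp only [List.map_append, List.map_cons] at hnd
  have hpre : ∀ q ∈ pre, q.1 ≠ jp.1 := by
    intro q hq heq
    have : jp.1 ∈ pre.map Prod.fst := heq ▸ List.mem_map_of_mem hq
    exact (List.disjoint_of_nodup_append hnd) this (by simp)
  have hsuf : ∀ q ∈ suf, q.1 ≠ jp.1 := by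
    intro q hq heq
    have h2 := (List.nodup_append.mp hnd).2.1
    rw [List.nodup_cons] at h2
    exact h2.1 (heq ▸ List.mem_map_of_mem hq)
  have hfil : (pre ++ jp :: suf).filter (fun q => q.1 = jp.1) = [jp] := by
    rw [List.filter_append, List.filter_cons]
    rw [List.filter_eq_nil_iff.mpr (by intro q hq; simpa using hpre q hq),
        List.filter_eq_nil_iff.mpr (by intro q hq; simpa using hsuf q hq)]
    simp
  rw [hfil]
  have := tdg_pay_split jp.1 jp.2 pre suf hpre hsuf
  simpa using this

-- ===== VERDICT (by name: the statement is the Claim_ definition above) =====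
theorem torneo_de_gallinas_spec : Claim_equal_torneo_de_gallinas := by
  intro es _ hpre
  unfold Spec_torneo_de_gallinas torneo_de_gallinas torneo_de_gallinas_alt
  dsimp only
  have hpre' : (es.map Prod.fst).Nodup := hpre
  have hinit : (es.foldl (fun d (jp : String × String) => d.insert jp.1 (0:Int)) PySem.Dict.empty) =
      PySem.Dict.mk (es.map (fun jp => (jp.1, (0:Int)))) := by
    apply PySem.Dict.ext
    have := PySem.Dict.items_foldl_insert_fresh es (fun jp => jp.1) (fun _ => (0:Int))
      PySem.Dict.empty (by intro a _; simp) hpre'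
    simpa using this
  set nd : Int := (((es.map Prod.snd).filter (fun p => p = "me desvio siempre")).length : Int) with hnd
  set nb : Int := (((es.map Prod.snd).filter (fun p => p = "me la banco y no me desvio")).length : Int) with hnb
  have hB := PySem.Dict.items_foldl_insert_fresh es (fun jp => jp.1)
      (fun jp => tdgScoreB nd nb jp.2) PySem.Dict.empty (by intro a _; simp) hpre'
  have hfold1 : (es.map Prod.fst).foldl (fun d k => d.insert k (0:Int)) PySem.Dict.empty =
      es.foldl (fun d (jp : String × String) => d.insert jp.1 (0:Int)) PySem.Dict.empty := by
    rw [List.foldl_map]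
  set init := es.foldl (fun d (jp : String × String) => d.insert jp.1 (0:Int)) PySem.Dict.empty with hinitdef
  have hcont : ∀ jp ∈ es, init.contains jp.1 = true := by
    intro jp hjp
    rw [hinit, PySem.Dict.contains_iff_mem_keys]
    simp only [PySem.Dict.keys]
    exact List.mem_map.2 ⟨(jp.1, 0), List.mem_map.2 ⟨jp, hjp, rfl⟩, rfl⟩
  obtain ⟨hkeys, hgetD⟩ := tdg_outer es es init hcont
  set F := es.foldl (fun d jp => es.foldl (tdgStepA jp) d) init with hF
  have hFkeys : F.keys = es.map Prod.fst := by
    rw [hkeys, hinit]; simp only [PySem.Dict.keys]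
    simp [List.map_map, Function.comp]
  have hFkeysnd : F.keys.Nodup := by rw [hFkeys]; exact hpre'
  have hitems := PySem.Dict.items_eq_map_keys F hFkeysnd 0
  rw [hfold1]
  rw [show (es.foldl (fun d jp => es.foldl (tdgStepA jp) d) init) = F from rfl]
  rw [hitems, hFkeys, hB, List.map_map]
  apply List.ext_getElem (by simp [PySem.Dict.empty])
  intro i hi1 hi2
  have hil : i < es.length := by simpa using hi1
  have hmem : es[i]'hil ∈ es := List.getElem_mem _
  set jp := es[i]'hil with hjp
  simp only [PySem.Dict.empty, List.nil_append, List.getElem_map, Function.comp_apply]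
  refine Prod.ext rfl ?_
  rw [hgetD jp.1]
  have hinit0 : init.getD jp.1 0 = 0 := by
    rw [hinit]
    have hmemit : (jp.1, (0:Int)) ∈ (PySem.Dict.mk (es.map fun (jp : String × String) => (jp.1, (0:Int)))).items := by
      exact List.mem_map.2 ⟨jp, hmem, rfl⟩
    have hnodup : (PySem.Dict.mk (es.map fun (jp : String × String) => (jp.1, (0:Int)))).keys.Nodup := by
      simp only [PySem.Dict.keys]
      simpa [List.map_map, Function.comp] using hpre'
    exact PySem.Dict.getD_of_mem_items _ hmemit hnodup 0
  rw [hinit0, zero_add]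
  have := tdg_filter_sum es hpre' jp hmem
  simpa using this
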